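-- pv_equiv track=rewrite | github.com/RegusAl/UBB | Semestrul 1/Fundamentele Programarii/Tehnici de programare/Divide and Conquer/numarul_de_numere_negative.py | numarul_de_numere
-- ===== SOURCE A (Python) =====
-- def numarul_de_numere(l):
--     if len(l) == 0:
--         return 0
--     if len(l) == 1:
--         if l[0] % 2 == 1:
--             return 1
--         return 0
--     middle = len(l) // 2
--     return numarul_de_numere(l[:middle]) + numarul_de_numere(l[middle:])
-- ===== SOURCE B (Python) =====
-- def numarul_de_numere(l):
--     count = 0
--     for x in l:
--         if x % 2 == 1:
--             count += 1
--     return count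
-- ===== Notes on version B (the rewrite author's own statement) =====
-- stated objective: faster
-- what changed: Replaces the divide-and-conquer recursion (split at the middle via slicing, recurse on both halves, sum) with a single flat counting loop over the list.
import Mathlib
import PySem

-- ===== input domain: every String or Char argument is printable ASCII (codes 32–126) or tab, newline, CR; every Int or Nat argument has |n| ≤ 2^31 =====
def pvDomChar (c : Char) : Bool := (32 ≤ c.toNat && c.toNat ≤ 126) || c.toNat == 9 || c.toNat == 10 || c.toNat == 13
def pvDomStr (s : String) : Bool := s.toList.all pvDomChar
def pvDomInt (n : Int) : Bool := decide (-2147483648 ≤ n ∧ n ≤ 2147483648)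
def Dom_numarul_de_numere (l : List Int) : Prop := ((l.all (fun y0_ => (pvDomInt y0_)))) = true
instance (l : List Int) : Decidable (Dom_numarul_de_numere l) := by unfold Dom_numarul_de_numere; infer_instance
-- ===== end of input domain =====

-- B replaces A's divide-and-conquer recursion by a single counting loop; objective: simpler.

-- ===== PORT A =====
-- l[:m] / l[m:] via PySem.List.slice; '%' and '//' via PySem floor semantics.
def numarul_de_numere (l : List Int) : Int :=
  if l.length = 0 then 0
  else if l.length = 1 then
    -- l[0]: index 0 is in range since len = 1
    (if PySem.Int.mod (PySem.List.pyGetD l 0 0) 2 = 1 then 1 else 0)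
  else
    let middle : Int := PySem.Int.floordiv (l.length : Int) 2
    numarul_de_numere (PySem.List.slice l none (some middle)) +
      numarul_de_numere (PySem.List.slice l (some middle) none)
termination_by l.length
decreasing_by
  · rw [show (PySem.Int.floordiv ((l.length : Nat) : Int) 2) = ((l.length / 2 : Nat) : Int) from
      by exact_mod_cast PySem.Int.floordiv_natCast l.length 2, PySem.List.slice_to_natCast]
    simp only [List.length_take]
    omega
  · rw [show (PySem.Int.floordiv ((l.length : Nat) : Int) 2) = ((l.length / 2 : Nat) : Int) from
      by exact_mod_cast PySem.Int.floordiv_natCast l.length 2, PySem.List.slice_from_natCast]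
    simp only [List.length_drop]
    omega

-- ===== PORT B =====
def numarul_de_numere_alt (l : List Int) : Int :=
  l.foldl (fun count x => if PySem.Int.mod x 2 = 1 then count + 1 else count) 0

-- ===== PRECONDITION & SPEC =====
def Spec_numarul_de_numere (l : List Int) (out : Int) : Prop := out = numarul_de_numere_alt l
instance (l : List Int) (out : Int) : Decidable (Spec_numarul_de_numere l out) := by unfold Spec_numarul_de_numere; infer_instance

-- ===== CLAIM (what is proved, stated in full; the proofs are below) =====
def Claim_equal_numarul_de_numere : Prop := ∀ (l : List Int), Dom_numarul_de_numere l → Spec_numarul_de_numere l (numarul_de_numere l)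

-- ===== LEMMAS AND PROOFS =====

-- B's loop is a sum of per-element indicators.
theorem alt_eq_sum (l : List Int) :
    numarul_de_numere_alt l
      = (l.map (fun x => if PySem.Int.mod x 2 = 1 then (1 : Int) else 0)).sum := by
  unfold numarul_de_numere_alt
  have h := PySem.List.foldl_add (l := l)
      (g := fun x => if PySem.Int.mod x 2 = 1 then (1 : Int) else 0) (a := 0)
  have hf : (fun (count : Int) (x : Int) => if PySem.Int.mod x 2 = 1 then count + 1 else count)
      = (fun (acc : Int) (x : Int) => acc + if PySem.Int.mod x 2 = 1 then 1 else 0) := by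
    funext c x; split_ifs <;> simp
  rw [hf, h]; ring

theorem alt_append (xs ys : List Int) :
    numarul_de_numere_alt (xs ++ ys) = numarul_de_numere_alt xs + numarul_de_numere_alt ys := by
  simp [alt_eq_sum]

theorem a_eq_alt (l : List Int) : numarul_de_numere l = numarul_de_numere_alt l := by
  induction l using numarul_de_numere.induct with
  | case1 l h0 =>
    have : l = [] := List.length_eq_zero_iff.mp h0
    subst this
    simp [numarul_de_numere, numarul_de_numere_alt]
  | case2 l h0 h1 hmod =>
    obtain ⟨x, hx⟩ : ∃ x, l = [x] := List.length_eq_one_iff.mp h1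
    subst hx
    simp_all [numarul_de_numere, numarul_de_numere_alt, PySem.List.pyGetD, PySem.List.pyGet?,
      PySem.List.pyIdx?]
  | case3 l h0 h1 hmod =>
    obtain ⟨x, hx⟩ : ∃ x, l = [x] := List.length_eq_one_iff.mp h1
    subst hx
    simp_all [numarul_de_numere, numarul_de_numere_alt, PySem.List.pyGetD, PySem.List.pyGet?,
      PySem.List.pyIdx?, Int.emod_eq_zero_of_dvd]
  | case4 l h0 h1 middle ih1 ih2 =>
    rw [numarul_de_numere, if_neg h0, if_neg h1]
    show numarul_de_numere (PySem.List.slice l none (some middle)) +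
        numarul_de_numere (PySem.List.slice l (some middle)) = numarul_de_numere_alt l
    rw [ih1, ih2]
    have hm : middle = ((l.length / 2 : Nat) : Int) := by
      exact_mod_cast PySem.Int.floordiv_natCast l.length 2
    rw [hm, PySem.List.slice_to_natCast, PySem.List.slice_from_natCast, ← alt_append,
      List.take_append_drop]

-- ===== VERDICT (by name: the statement is the Claim_ definition above) =====
theorem numarul_de_numere_spec : Claim_equal_numarul_de_numere := by
  intro l _
  unfold Spec_numarul_de_numere
  exact a_eq_alt l
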